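-- pv_equiv track=rewrite | github.com/kao027/STAT175Project | random_walk_to_categories.py | detect_pagerank_columns
-- ===== SOURCE A (Python) =====
-- def detect_pagerank_columns(fieldnames):
--     lowered = {name.lower().strip(): name for name in fieldnames}
--
--     node_candidates = ["node_id", "node", "page", "page_id", "id", "vertex", "title"]
--     score_candidates = ["pagerank", "page_rank", "score", "rank", "pr"]
--
--     node_col = next((lowered[c] for c in node_candidates if c in lowered), None)
--     score_col = next((lowered[c] for c in score_candidates if c in lowered), None)
--
--     if node_col is None or score_col is None:
--         raise ValueError(
--             "Could not detect pagerank.csv columns. "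
--             f"Found columns: {fieldnames}. "
--             "Need one node column (e.g. node_id, node, page_id, id) and one score column "
--             "(e.g. pagerank, score, rank)."
--         )
--
--     return node_col, score_col
-- ===== SOURCE B (Python) =====
-- def detect_pagerank_columns(fieldnames):
--     node_candidates = ["node_id", "node", "page", "page_id", "id", "vertex", "title"]
--     score_candidates = ["pagerank", "page_rank", "score", "rank", "pr"]
--
--     node_best = None   # (candidate rank, original name); lower rank wins, ties -> later name
--     score_best = None
--     for name in fieldnames:
--         key = name.lower().strip()
--         if key in node_candidates:
--             r = node_candidates.index(key)
--             if node_best is None or r <= node_best[0]: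
--                 node_best = (r, name)
--         if key in score_candidates:
--             r = score_candidates.index(key)
--             if score_best is None or r <= score_best[0]:
--                 score_best = (r, name)
--
--     if node_best is None or score_best is None:
--         raise ValueError(
--             "Could not detect pagerank.csv columns. "
--             f"Found columns: {fieldnames}. "
--             "Need one node column (e.g. node_id, node, page_id, id) and one score column "
--             "(e.g. pagerank, score, rank)."
--         )
--
--     return node_best[1], score_best[1]
-- ===== Notes on version B (the rewrite author's own statement) =====
-- stated objective: alternative
-- what changed: Instead of building a lowered->original dict and probing it in candidate-priority order, B makes a single pass over the fieldnames maintaining a minimum-candidate-rank accumulator for each of the two roles (ties broken toward the later fieldname, which matches the dict's overwrite-wins semantics).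
import Mathlib
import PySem

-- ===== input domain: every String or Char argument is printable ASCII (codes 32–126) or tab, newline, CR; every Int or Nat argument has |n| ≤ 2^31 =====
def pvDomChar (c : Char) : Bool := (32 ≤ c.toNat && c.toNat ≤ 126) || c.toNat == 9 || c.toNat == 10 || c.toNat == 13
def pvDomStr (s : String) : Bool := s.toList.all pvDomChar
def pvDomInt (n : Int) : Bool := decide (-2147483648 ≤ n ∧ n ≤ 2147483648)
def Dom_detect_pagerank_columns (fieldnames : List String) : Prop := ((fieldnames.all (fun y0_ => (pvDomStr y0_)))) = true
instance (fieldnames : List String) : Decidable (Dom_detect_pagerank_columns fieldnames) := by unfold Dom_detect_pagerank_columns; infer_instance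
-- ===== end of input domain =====

-- B replaces A's lowered->original dict probed in candidate-priority order by a single pass
-- over the fieldnames keeping a minimum-candidate-rank accumulator (ties -> later fieldname);
-- same ValueError (Pre_ excludes the raising inputs).


-- ===== PORT A =====
-- name.lower().strip()
def pvKey (name : String) : String := PySem.Str.strip (PySem.Str.lower name)

def pvNodeCandidates : List String := ["node_id", "node", "page", "page_id", "id", "vertex", "title"]
def pvScoreCandidates : List String := ["pagerank", "page_rank", "score", "rank", "pr"]

-- lowered = {name.lower().strip(): name for name in fieldnames}
def pvLowered (fieldnames : List String) : PySem.Dict String String :=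
  fieldnames.foldl (fun d n => d.insert (pvKey n) n) PySem.Dict.empty

-- next((lowered[c] for c in candidates if c in lowered), None)
def pvFirstHit (d : PySem.Dict String String) : List String → Option String
  | [] => none
  | c :: cs => if d.contains c then d.get? c else pvFirstHit d cs

def detect_pagerank_columns (fieldnames : List String) : String × String :=
  let lowered := pvLowered fieldnames
  match pvFirstHit lowered pvNodeCandidates, pvFirstHit lowered pvScoreCandidates with
  | some n, some s => (n, s)
  | _, _ => ("", "")   -- Python raises ValueError here; excluded by Pre_

-- ===== PORT B =====
-- 'if key in cands: r = cands.index(key); if best is None or r <= best[0]: best = (r, name)'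
def pvUpd (cands : List String) (best : Option (Nat × String)) (name key : String) :
    Option (Nat × String) :=
  match PySem.List.index? cands key with
  | none => best
  | some r =>
    match best with
    | none => some (r, name)
    | some (r0, _) => if r ≤ r0 then some (r, name) else best

-- one iteration of the 'for name in fieldnames' loop: key = name.lower().strip(),
-- then update both accumulators
def pvStep (nodeCands scoreCands : List String)
    (st : Option (Nat × String) × Option (Nat × String)) (name : String) :
    Option (Nat × String) × Option (Nat × String) :=
  let key := PySem.Str.strip (PySem.Str.lower name)
  (pvUpd nodeCands st.1 name key, pvUpd scoreCands st.2 name key)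

def detect_pagerank_columns_alt (fieldnames : List String) : String × String :=
  let node_candidates := ["node_id", "node", "page", "page_id", "id", "vertex", "title"]
  let score_candidates := ["pagerank", "page_rank", "score", "rank", "pr"]
  let st := fieldnames.foldl (pvStep node_candidates score_candidates) (none, none)
  -- 'if node_best is None or score_best is None: raise' as sequential Option checks
  match st.1 with
  | none => ("", "")   -- Python raises ValueError here; excluded by Pre_
  | some (_, n) =>
    match st.2 with
    | none => ("", "")   -- Python raises ValueError here; excluded by Pre_
    | some (_, s) => (n, s)

-- ===== PRECONDITION & SPEC =====
-- Pre_ holds exactly when some fieldname matches a node candidate AND some fieldname matches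
-- a score candidate; otherwise the Python (both A and B) raises ValueError.
def Pre_detect_pagerank_columns (fieldnames : List String) : Prop :=
  (["node_id", "node", "page", "page_id", "id", "vertex", "title"].any
      (fun c => fieldnames.any (fun n => PySem.Str.strip (PySem.Str.lower n) == c))) = true ∧
  (["pagerank", "page_rank", "score", "rank", "pr"].any
      (fun c => fieldnames.any (fun n => PySem.Str.strip (PySem.Str.lower n) == c))) = true
instance (fieldnames : List String) : Decidable (Pre_detect_pagerank_columns fieldnames) := by
  unfold Pre_detect_pagerank_columns; infer_instance

def pvWitness_detect_pagerank_columns : List String := ["Node", "PageRank"]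

def Spec_detect_pagerank_columns (fieldnames : List String) (out : String × String) : Prop := out = detect_pagerank_columns_alt fieldnames
instance (fieldnames : List String) (out : String × String) : Decidable (Spec_detect_pagerank_columns fieldnames out) := by unfold Spec_detect_pagerank_columns; infer_instance

-- ===== CLAIM (what is proved, stated in full; the proofs are below) =====
def Claim_equal_detect_pagerank_columns : Prop := ∀ (fieldnames : List String), Dom_detect_pagerank_columns fieldnames → Pre_detect_pagerank_columns fieldnames → Spec_detect_pagerank_columns fieldnames (detect_pagerank_columns fieldnames)

-- ===== LEMMAS AND PROOFS =====

-- rank-annotated version of A's candidate scan over the dict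
def pvBestAux (d : PySem.Dict String String) : List String → Option (Nat × String)
  | [] => none
  | c :: cs =>
    if d.contains c then (d.get? c).map (fun n => (0, n))
    else (pvBestAux d cs).map (fun p => (p.1 + 1, p.2))

lemma pv_firstHit_eq_bestAux (d : PySem.Dict String String) (cands : List String) :
    pvFirstHit d cands = (pvBestAux d cands).map Prod.snd := by
  induction cands with
  | nil => rfl
  | cons c cs ih =>
    simp only [pvFirstHit, pvBestAux]
    by_cases h : d.contains c
    · simp only [h, if_true, Option.map_map]
      cases d.get? c <;> rfl
    · simp only [h, ih]
      cases pvBestAux d cs <;> rfl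

lemma pv_bestAux_insert (d : PySem.Dict String String) (cands : List String) (k v : String) :
    pvBestAux (d.insert k v) cands = pvUpd cands (pvBestAux d cands) v k := by
  induction cands with
  | nil => rfl
  | cons c cs ih =>
    by_cases hck : c = k
    · subst hck
      have hidx : PySem.List.index? (c :: cs) c = some 0 := PySem.List.index?_cons_self c cs
      have hcont : (d.insert c v).contains c = true := by
        rw [PySem.Dict.contains_eq_isSome_get?, PySem.Dict.get?_insert]
        simp
      have hget : (d.insert c v).get? c = some v := by
        rw [PySem.Dict.get?_insert]; simp
      simp only [pvBestAux, pvUpd, hidx, hcont, hget, if_true]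
      by_cases h : d.contains c = true
      · have hs : (d.get? c).isSome := by
          rw [← PySem.Dict.contains_eq_isSome_get?]; exact h
        obtain ⟨w, hw⟩ := Option.isSome_iff_exists.mp hs
        simp [h, hw]
      · have hcf : d.contains c = false := by simpa using h
        rw [hcf]
        cases pvBestAux d cs <;> simp
    · have hidx : PySem.List.index? (c :: cs) k
          = (PySem.List.index? cs k).map (· + 1) :=
        PySem.List.index?_cons_of_ne cs hck
      have hcont : (d.insert k v).contains c = d.contains c := by
        rw [PySem.Dict.contains_eq_isSome_get?, PySem.Dict.contains_eq_isSome_get?,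
          PySem.Dict.get?_insert, if_neg (by simpa using hck)]
      have hget : (d.insert k v).get? c = d.get? c := by
        rw [PySem.Dict.get?_insert, if_neg (by simpa using hck)]
      simp only [pvBestAux, pvUpd, hidx, hcont, hget, ih]
      by_cases h : d.contains c = true
      · -- the head candidate already matches with rank 0; a later (+1) rank never beats it
        have hs : (d.get? c).isSome := by
          rw [← PySem.Dict.contains_eq_isSome_get?]; exact h
        obtain ⟨w, hw⟩ := Option.isSome_iff_exists.mp hs
        rw [h, hw]
        cases hi : PySem.List.index? cs k <;> simp
      · have hcf : d.contains c = false := by simpa using h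
        rw [hcf]
        simp only [Bool.false_eq_true, if_false]
        cases hi : PySem.List.index? cs k with
        | none => simp
        | some r =>
          cases hb : pvBestAux d cs with
          | none => simp
          | some p =>
            obtain ⟨r0, w⟩ := p
            by_cases hr : r ≤ r0
            · have hr' : r + 1 ≤ r0 + 1 := by omega
              simp [hr, hr']
            · have hr' : ¬ (r + 1 ≤ r0 + 1) := by omega
              simp [hr, hr']

lemma pv_bestAux_empty (cands : List String) :
    pvBestAux (PySem.Dict.empty : PySem.Dict String String) cands = none := by
  induction cands with
  | nil => rfl
  | cons c cs ih =>
    simp [pvBestAux, ih, PySem.Dict.contains_eq_isSome_get?, PySem.Dict.get?_empty]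

lemma pv_fold_eq_bestAux (fieldnames : List String) :
    ∀ d : PySem.Dict String String,
    fieldnames.foldl (pvStep pvNodeCandidates pvScoreCandidates)
        (pvBestAux d pvNodeCandidates, pvBestAux d pvScoreCandidates)
      = (pvBestAux (fieldnames.foldl (fun d n => d.insert (pvKey n) n) d) pvNodeCandidates,
         pvBestAux (fieldnames.foldl (fun d n => d.insert (pvKey n) n) d) pvScoreCandidates) := by
  induction fieldnames with
  | nil => intro d; rfl
  | cons n ns ih =>
    intro d
    simp only [List.foldl_cons]
    have hstep : pvStep pvNodeCandidates pvScoreCandidates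
          (pvBestAux d pvNodeCandidates, pvBestAux d pvScoreCandidates) n
        = (pvBestAux (d.insert (pvKey n) n) pvNodeCandidates,
           pvBestAux (d.insert (pvKey n) n) pvScoreCandidates) := by
      simp only [pvStep, pv_bestAux_insert]; rfl
    rw [hstep, ih]

-- ===== VERDICT (by name: the statement is the Claim_ definition above) =====
theorem detect_pagerank_columns_spec : Claim_equal_detect_pagerank_columns := by
  intro fieldnames _ _
  simp only [Spec_detect_pagerank_columns, detect_pagerank_columns, detect_pagerank_columns_alt]
  have hfold := pv_fold_eq_bestAux fieldnames PySem.Dict.empty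
  rw [pv_bestAux_empty, pv_bestAux_empty,
      show pvStep pvNodeCandidates pvScoreCandidates
        = pvStep ["node_id", "node", "page", "page_id", "id", "vertex", "title"]
            ["pagerank", "page_rank", "score", "rank", "pr"] from rfl] at hfold
  rw [hfold]
  rw [show pvLowered fieldnames
        = fieldnames.foldl (fun d n => d.insert (pvKey n) n) PySem.Dict.empty from rfl,
      pv_firstHit_eq_bestAux, pv_firstHit_eq_bestAux]
  cases pvBestAux (fieldnames.foldl (fun d n => d.insert (pvKey n) n) PySem.Dict.empty)
      pvNodeCandidates with
  | none =>
    cases pvBestAux (fieldnames.foldl (fun d n => d.insert (pvKey n) n) PySem.Dict.empty)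
        pvScoreCandidates <;> rfl
  | some p =>
    obtain ⟨r, n⟩ := p
    cases pvBestAux (fieldnames.foldl (fun d n => d.insert (pvKey n) n) PySem.Dict.empty)
        pvScoreCandidates with
    | none => rfl
    | some q => obtain ⟨r2, sc⟩ := q; rfl
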